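-- pv_equiv track=rewrite | github.com/minnseong/Algorithm | programmers/Test/tossNextChallenge_Q1.py | solution
-- ===== SOURCE A (Python) =====
-- def solution(s):
--     answer = 0
--
--     good_num = -1
--     for i in range(len(s)-2):
--         if s[i] == s[i+1] == s[i+2]:
--             good_num = max(int(s[i]), good_num)
--
--     if good_num == -1:
--         return -1
--     elif good_num == 0:
--         return 0
--     else:
--         return good_num * 100 + good_num * 10 + good_num
-- ===== SOURCE B (Python) =====
-- def solution(s):
--     best = -1
--     i, n = 0, len(s)
--     while i < n:
--         j = i + 1
--         while j < n and s[j] == s[i]: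
--             j += 1
--         if j - i >= 3:
--             best = max(best, int(s[i]))
--         i = j
--     return -1 if best == -1 else best * 111
-- ===== Notes on version B (the rewrite author's own statement) =====
-- stated objective: alternative
-- what changed: B peels maximal runs of equal characters with two pointers and folds a max over runs of length >= 3, instead of A's sliding 3-window scan over all indices; the final wrap is best*111 instead of A's three-way branch.
import Mathlib
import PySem

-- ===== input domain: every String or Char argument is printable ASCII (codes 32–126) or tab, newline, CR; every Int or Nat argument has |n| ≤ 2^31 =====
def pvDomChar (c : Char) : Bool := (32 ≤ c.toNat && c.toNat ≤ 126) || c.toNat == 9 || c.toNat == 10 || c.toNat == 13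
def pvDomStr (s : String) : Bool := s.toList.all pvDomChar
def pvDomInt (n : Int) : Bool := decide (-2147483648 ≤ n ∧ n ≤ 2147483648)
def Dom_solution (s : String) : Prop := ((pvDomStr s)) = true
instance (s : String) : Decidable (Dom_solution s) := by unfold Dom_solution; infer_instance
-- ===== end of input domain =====

-- B is an alternative linear scan: it peels maximal runs of equal characters (two pointers)
-- instead of A's sliding 3-window over indices; return value only, no side effects.

-- ===== PORT A =====
-- int(c) for a one-character string; Pre_solution guarantees c is a digit wherever it is
-- evaluated, so ofStr? = some there and getD is never the fallback on admitted inputs.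
def pyIntChar (c : Char) : Int := (PySem.Int.ofStr? (String.ofList [c])).getD 0

-- the loop 'for i in range(len(s)-2): if s[i]==s[i+1]==s[i+2]: good_num = max(int(s[i]), good_num)'
-- as the obvious structural window recursion over the same state good_num
def solutionScan : List Char → Int → Int
  | a :: b :: c :: t, g => solutionScan (b :: c :: t) (if a = b ∧ b = c then max (pyIntChar a) g else g)
  | _, g => g

def solution (s : String) : Int :=
  let good_num := solutionScan s.toList (-1)
  if good_num = -1 then -1
  else if good_num = 0 then 0
  else good_num * 100 + good_num * 10 + good_num

-- ===== PORT B =====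
-- outer while loop of Source B: peel the maximal run of the head character (inner while = takeWhile/dropWhile)
def solutionRuns : List Char → Int → Int
  | [], g => g
  | c :: t, g =>
      solutionRuns (t.dropWhile (· == c))
        (if 3 ≤ (t.takeWhile (· == c)).length + 1 then max g (pyIntChar c) else g)
  termination_by l _ => l.length
  decreasing_by
    exact Nat.lt_succ_of_le (List.length_dropWhile_le _ _)

def solution_alt (s : String) : Int :=
  let best := solutionRuns s.toList (-1)
  if best = -1 then -1 else best * 111

-- ===== PRECONDITION & SPEC =====
-- Pre_ excludes exactly the inputs on which both Pythons raise ValueError: three consecutive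
-- equal non-digit characters make A (and B) call int() on a non-digit.
def Pre_solution (s : String) : Prop :=
  ∀ x ∈ s.toList.zip (s.toList.tail.zip s.toList.tail.tail),
    (x.1 = x.2.1 ∧ x.2.1 = x.2.2) → x.1.isDigit = true
instance (s : String) : Decidable (Pre_solution s) := by unfold Pre_solution; infer_instance
def pvWitness_solution : String := "aa111b"

def Spec_solution (s : String) (out : Int) : Prop := out = solution_alt s
instance (s : String) (out : Int) : Decidable (Spec_solution s out) := by unfold Spec_solution; infer_instance

-- ===== CLAIM (what is proved, stated in full; the proofs are below) =====
def Claim_equal_solution : Prop := ∀ (s : String), Dom_solution s → Pre_solution s → Spec_solution s (solution s)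

-- ===== LEMMAS AND PROOFS =====

-- A's window scan over a maximal run (a block of k equal chars followed by a list not starting
-- with that char) contributes max (pyIntChar c) exactly when k ≥ 3.
theorem scan_replicate (k : Nat) (c : Char) (rest : List Char)
    (h : ∀ d ∈ rest.head?, d ≠ c) (g : Int) :
    solutionScan (List.replicate k c ++ rest) g
      = solutionScan rest (if 3 ≤ k then max (pyIntChar c) g else g) := by
  induction k using Nat.strong_induction_on generalizing g with
  | _ k ih =>
    match k with
    | 0 => simp
    | 1 =>
      match rest, h with
      | [], _ => simp [solutionScan]
      | [b], _ => simp [solutionScan]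
      | b :: d :: t, h =>
        have hb : b ≠ c := h b (by simp)
        have hcb : ¬ (c = b ∧ b = d) := fun hx => hb hx.1.symm
        simp [solutionScan, hcb]
    | 2 =>
      match rest, h with
      | [], _ => simp [solutionScan]
      | b :: t, h =>
        have hb : b ≠ c := h b (by simp)
        have hcb : (c = b) = False := eq_false (fun hx => hb hx.symm)
        have : solutionScan (List.replicate 2 c ++ b :: t) g
            = solutionScan (List.replicate 1 c ++ b :: t) g := by
          simp [solutionScan, hcb]
        rw [this, ih 1 (by omega) g]
        simp
    | (m + 3) =>
      have step : solutionScan (List.replicate (m + 3) c ++ rest) g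
          = solutionScan (List.replicate (m + 2) c ++ rest) (max (pyIntChar c) g) := by
        simp [List.replicate_succ, solutionScan]
      rw [step, ih (m + 2) (by omega) (max (pyIntChar c) g)]
      rcases Nat.eq_zero_or_pos m with hm | hm
      · subst hm; simp
      · have h2 : 3 ≤ m + 2 := by omega
        simp [h2]

-- decompose a nonempty list into its leading maximal run and the remainder
theorem run_decomp (c : Char) (t : List Char) :
    c :: t = List.replicate ((t.takeWhile (· == c)).length + 1) c ++ t.dropWhile (· == c) := by
  have htw : t.takeWhile (· == c) = List.replicate (t.takeWhile (· == c)).length c := by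
    apply List.eq_replicate_of_mem
    intro d hd
    have := List.mem_takeWhile_imp hd
    simpa using this
  calc c :: t = c :: (t.takeWhile (· == c) ++ t.dropWhile (· == c)) := by
        rw [List.takeWhile_append_dropWhile]
    _ = _ := by
        rw [List.replicate_succ, List.cons_append]
        rw [htw]
        simp

theorem scan_eq_runs (l : List Char) (g : Int) : solutionScan l g = solutionRuns l g := by
  suffices H : ∀ (n : Nat) (l : List Char), l.length ≤ n → ∀ (g : Int),
      solutionScan l g = solutionRuns l g from H l.length l le_rfl g
  intro n
  induction n with
  | zero =>
    intro l hl g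
    rw [List.length_eq_zero_iff.mp (Nat.le_zero.mp hl)]
    simp [solutionScan, solutionRuns]
  | succ n ih =>
    intro l hl g
    match l with
    | [] => simp [solutionScan, solutionRuns]
    | c :: t =>
      have hrest : ∀ d ∈ (t.dropWhile (· == c)).head?, d ≠ c := by
        intro d hd
        have := List.head?_dropWhile_not (· == c) t
        rw [hd] at this
        simpa using this
      have hlen : (t.dropWhile (· == c)).length ≤ n :=
        le_trans (List.length_dropWhile_le _ _) (Nat.le_of_succ_le_succ hl)
      calc solutionScan (c :: t) g
          = solutionScan (List.replicate ((t.takeWhile (· == c)).length + 1) c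
              ++ t.dropWhile (· == c)) g := by rw [← run_decomp]
        _ = solutionScan (t.dropWhile (· == c))
              (if 3 ≤ (t.takeWhile (· == c)).length + 1 then max (pyIntChar c) g else g) :=
            scan_replicate _ c _ hrest g
        _ = solutionRuns (t.dropWhile (· == c))
              (if 3 ≤ (t.takeWhile (· == c)).length + 1 then max g (pyIntChar c) else g) := by
            rw [ih _ hlen, max_comm]
        _ = solutionRuns (c :: t) g := by rw [solutionRuns]

-- ===== VERDICT (by name: the statement is the Claim_ definition above) =====
theorem solution_spec : Claim_equal_solution := by
  intro s _ _
  unfold Spec_solution solution solution_alt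
  rw [scan_eq_runs]
  set g := solutionRuns s.toList (-1) with hg
  by_cases h1 : g = -1
  · simp [h1]
  · by_cases h0 : g = 0
    · simp [h0]
    · simp only [h1, h0, if_false]
      ring
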